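-- pv_equiv track=rewrite | github.com/qn06142/coding-python | beautarr.py | yeag
-- ===== SOURCE A (Python) =====
-- def yeag(arr, n):
--     count = 0
--     for l in range(n):
--         freq = {}
--         for r in range(l, n):
--             if arr[r] in freq:
--                 freq[arr[r]] += 1
--             else:
--                 freq[arr[r]] = 1
--             if freq[arr[r]] > 2:
--                 break
--             else:
--                 count += 1
--     return count
-- ===== SOURCE B (Python) =====
-- def yeag(arr, n):
--     count = 0
--     freq = {}
--     l = 0
--     for r in range(n):
--         v = arr[r]
--         freq[v] = freq.get(v, 0) + 1
--         while freq[v] > 2: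
--             u = arr[l]
--             freq[u] -= 1
--             l += 1
--         count += r - l + 1
--     return count
-- ===== Notes on version B (the rewrite author's own statement) =====
-- stated objective: faster
-- what changed: Replaced the restart-per-left-endpoint nested scan by a single two-pointer sliding window with one persistent frequency map, adding r-l+1 valid subarrays per right endpoint.
import Mathlib
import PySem

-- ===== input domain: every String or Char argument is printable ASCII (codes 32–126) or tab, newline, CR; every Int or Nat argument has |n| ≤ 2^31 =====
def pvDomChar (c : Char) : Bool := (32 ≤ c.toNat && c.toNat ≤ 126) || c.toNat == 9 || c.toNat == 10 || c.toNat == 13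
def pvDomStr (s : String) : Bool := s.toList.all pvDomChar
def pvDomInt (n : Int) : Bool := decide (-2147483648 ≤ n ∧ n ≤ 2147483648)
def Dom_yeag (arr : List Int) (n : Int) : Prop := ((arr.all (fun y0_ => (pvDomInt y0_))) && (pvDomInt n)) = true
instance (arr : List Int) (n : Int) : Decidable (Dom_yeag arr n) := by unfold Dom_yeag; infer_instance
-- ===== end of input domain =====

-- B replaces A's restart-per-left-endpoint O(n^2) scan by a single O(n) two-pointer
-- sliding window with one persistent frequency map (objective: faster).

-- ===== PORT A =====
-- inner 'for r in range(l, n)' loop of A, with its break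
def yeagInnerA (arr : List Int) (rs : List Int) (freq : PySem.Dict Int Int) (count : Int) : Int :=
  match rs with
  | [] => count
  | r :: rest =>
    let v := PySem.List.pyGetD arr r 0
    let freq' := match freq.get? v with
      | some c => freq.insert v (c + 1)
      | none => freq.insert v 1
    if 2 < freq'.getD v 0 then count
    else yeagInnerA arr rest freq' (count + 1)

def yeag (arr : List Int) (n : Int) : Int :=
  (PySem.List.pyRange 0 n 1).foldl
    (fun count l => yeagInnerA arr (PySem.List.pyRange l n 1) PySem.Dict.empty count) 0

-- ===== PORT B =====
-- the 'while freq[v] > 2' loop of B; fuel (r + 1 - l).toNat bounds its iteration count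
def yeagShrink (arr : List Int) (v : Int) : Nat → PySem.Dict Int Int → Int → PySem.Dict Int Int × Int
  | 0, freq, l => (freq, l)
  | fuel+1, freq, l =>
    if 2 < freq.getD v 0 then
      let u := PySem.List.pyGetD arr l 0
      yeagShrink arr v fuel (freq.insert u (freq.getD u 0 - 1)) (l + 1)
    else (freq, l)

def yeag_alt (arr : List Int) (n : Int) : Int :=
  (((PySem.List.pyRange 0 n 1).foldl
    (fun (st : PySem.Dict Int Int × Int × Int) r =>
      let freq0 := st.1.insert (PySem.List.pyGetD arr r 0) (st.1.getD (PySem.List.pyGetD arr r 0) 0 + 1)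
      let p := yeagShrink arr (PySem.List.pyGetD arr r 0) (r + 1 - st.2.1).toNat freq0 st.2.1
      (p.1, p.2, st.2.2 + (r - p.2 + 1)))
    (PySem.Dict.empty, 0, 0)) : PySem.Dict Int Int × Int × Int).2.2

-- ===== PRECONDITION & SPEC =====
-- Pre_ excludes exactly the inputs where A raises IndexError: n larger than len(arr).
def Pre_yeag (arr : List Int) (n : Int) : Prop := n ≤ (arr.length : Int)
instance (arr : List Int) (n : Int) : Decidable (Pre_yeag arr n) := by unfold Pre_yeag; infer_instance
def pvWitness_yeag : List Int × Int := ([1, 2, 1, 2, 3], 5)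

def Spec_yeag (arr : List Int) (n : Int) (out : Int) : Prop := out = yeag_alt arr n
instance (arr : List Int) (n : Int) (out : Int) : Decidable (Spec_yeag arr n out) := by unfold Spec_yeag; infer_instance

-- ===== CLAIM (what is proved, stated in full; the proofs are below) =====
def Claim_equal_yeag : Prop := ∀ (arr : List Int) (n : Int), Dom_yeag arr n → Pre_yeag arr n → Spec_yeag arr n (yeag arr n)

-- ===== LEMMAS AND PROOFS =====

-- window arr[l:r]
def win (arr : List Int) (l r : Nat) : List Int := (arr.take r).drop l

def okP (arr : List Int) (l r : Nat) : Prop := ∀ v : Int, (win arr l r).count v ≤ 2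

def okB (arr : List Int) (l r : Nat) : Bool :=
  (win arr l r).all (fun v => (win arr l r).count v ≤ 2)

lemma okB_iff (arr : List Int) (l r : Nat) : okB arr l r = true ↔ okP arr l r := by
  unfold okB okP
  simp only [List.all_eq_true, decide_eq_true_eq]
  constructor
  · intro h v
    by_cases hv : v ∈ win arr l r
    · exact h v hv
    · simp [List.count_eq_zero_of_not_mem hv]
  · intro h v _
    exact h v

lemma win_prefix (arr : List Int) (l : Nat) {r' r : Nat} (h : r' ≤ r) :
    win arr l r' <+: win arr l r :=
  List.IsPrefix.drop (List.take_prefix_take_left h) l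

lemma count_mono_r (arr : List Int) (l : Nat) {r' r : Nat} (h : r' ≤ r) (v : Int) :
    (win arr l r').count v ≤ (win arr l r).count v :=
  List.Sublist.count_le v (win_prefix arr l h).sublist

lemma count_mono_l (arr : List Int) {l l' : Nat} (r : Nat) (h : l ≤ l') (v : Int) :
    (win arr l' r).count v ≤ (win arr l r).count v := by
  have : win arr l' r = (win arr l r).drop (l' - l) := by
    unfold win
    rw [List.drop_drop]
    congr 1
    omega
  rw [this]
  exact List.Sublist.count_le v (List.drop_sublist _ _)

lemma win_succ (arr : List Int) {l r : Nat} (h1 : l ≤ r) (h2 : r < arr.length) :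
    win arr l (r+1) = win arr l r ++ [arr[r]] := by
  unfold win
  rw [List.take_succ_eq_append_getElem h2,
      List.drop_append_of_le_length (by simp; omega)]

lemma win_cons (arr : List Int) {l r : Nat} (h1 : l < r) (h2 : r ≤ arr.length) :
    win arr l r = arr[l]'(by omega) :: win arr (l+1) r := by
  unfold win
  rw [List.drop_eq_getElem_cons (by simp; omega)]
  congr 1
  exact List.getElem_take

lemma length_win (arr : List Int) (l : Nat) {r : Nat} (h : r ≤ arr.length) :
    (win arr l r).length = r - l := by
  unfold win
  simp
  omega

lemma win_self (arr : List Int) (l : Nat) : win arr l l = [] := by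
  apply List.drop_eq_nil_of_le
  simp

-- dict encodes the multiset of a window
def Enc (freq : PySem.Dict Int Int) (w : List Int) : Prop :=
  ∀ v : Int, freq.getD v 0 = (w.count v : Int)

lemma Enc_empty : Enc PySem.Dict.empty [] := by
  intro v
  simp [PySem.Dict.getD_empty]

lemma Enc_insert_add (freq : PySem.Dict Int Int) (w : List Int) (v : Int) (h : Enc freq w) :
    Enc (freq.insert v (freq.getD v 0 + 1)) (w ++ [v]) := by
  intro u
  rw [PySem.Dict.getD_insert]
  by_cases hu : u = v
  · subst hu
    simp [h u, List.count_append]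
  · simp [hu, h u, List.count_append, Ne.symm hu]

lemma A_step_freq (freq : PySem.Dict Int Int) (v : Int) :
    (match freq.get? v with
     | some c => freq.insert v (c + 1)
     | none => freq.insert v 1) = freq.insert v (freq.getD v 0 + 1) := by
  cases h : freq.get? v <;> simp [PySem.Dict.getD_eq_get?_getD, h]

lemma A_inner (arr : List Int) (m : Nat) (hlen : m ≤ arr.length) :
    ∀ (k l r0 : Nat), m - r0 ≤ k → l ≤ r0 → r0 ≤ m →
    ∀ (freq : PySem.Dict Int Int) (count : Int),
    Enc freq (win arr l r0) → okP arr l r0 →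
    yeagInnerA arr (PySem.List.pyRange (r0:Int) (m:Int) 1) freq count
      = count + ∑ r ∈ Finset.Ico r0 m, (if okB arr l (r+1) = true then (1:Int) else 0) := by
  intro k
  induction k with
  | zero =>
    intro l r0 hk hl hr0 freq count henc hok
    have : r0 = m := by omega
    subst this
    rw [PySem.List.pyRange_one_eq_nil (by omega)]
    simp [yeagInnerA]
  | succ k ih =>
    intro l r0 hk hl hr0 freq count henc hok
    by_cases hrm : r0 = m
    · subst hrm
      rw [PySem.List.pyRange_one_eq_nil (by omega)]
      simp [yeagInnerA]
    · have hrlt : r0 < m := lt_of_le_of_ne hr0 hrm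
      have hr0len : r0 < arr.length := by omega
      rw [PySem.List.pyRange_one_cons (by exact_mod_cast hrlt)]
      simp only [yeagInnerA]
      have hget : PySem.List.pyGetD arr (r0:Int) 0 = arr[r0] := by
        simp [PySem.List.pyGetD_natCast, List.getD_eq_getElem?_getD, List.getElem?_eq_getElem hr0len]
      rw [hget, A_step_freq]
      have hwsucc : win arr l (r0+1) = win arr l r0 ++ [arr[r0]] := win_succ arr hl hr0len
      have henc' : Enc (freq.insert arr[r0] (freq.getD arr[r0] 0 + 1)) (win arr l (r0+1)) := by
        rw [hwsucc]; exact Enc_insert_add freq _ _ henc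
      have hval := henc' arr[r0]
      by_cases hbig : 2 < (win arr l (r0+1)).count arr[r0]
      · rw [if_pos (by rw [hval]; exact_mod_cast hbig)]
        have hz : ∀ r ∈ Finset.Ico r0 m, (if okB arr l (r+1) = true then (1:Int) else 0) = 0 := by
          intro r hr
          rw [Finset.mem_Ico] at hr
          have hnok : ¬ okP arr l (r+1) := by
            intro hok'
            have := count_mono_r arr l (show r0+1 ≤ r+1 by omega) arr[r0]
            have := hok' arr[r0]
            omega
          rw [if_neg]
          intro hb
          exact hnok ((okB_iff arr l (r+1)).1 hb)
        rw [Finset.sum_congr rfl hz]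
        simp
      · rw [if_neg (by rw [hval]; exact_mod_cast hbig)]
        have hok' : okP arr l (r0+1) := by
          intro u
          by_cases hu : u = arr[r0]
          · subst hu; omega
          · rw [hwsucc, List.count_append]
            have h1 := hok u
            have h2 : List.count u [arr[r0]] = 0 :=
              List.count_eq_zero.2 (by simp [hu])
            omega
        have hrec := ih l (r0+1) (by omega) (by omega) (by omega)
          (freq.insert arr[r0] (freq.getD arr[r0] 0 + 1)) (count + 1) henc' hok'
        have hcast : ((r0:Int) + 1) = ((r0+1 : Nat) : Int) := by push_cast; ring
        rw [hcast, hrec, Finset.sum_eq_sum_Ico_succ_bot hrlt]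
        rw [if_pos ((okB_iff arr l (r0+1)).2 hok')]
        ring

lemma sum_shift (arr : List Int) (m l : Nat) :
    (∑ r ∈ Finset.Ico l m, (if okB arr l (r+1) = true then (1:Int) else 0))
      = ∑ r ∈ Finset.range m, (if l ≤ r ∧ okB arr l (r+1) = true then (1:Int) else 0) := by
  rw [Finset.range_eq_Ico]
  rw [← Finset.sum_subset (Finset.Ico_subset_Ico (Nat.zero_le l) le_rfl)
      (fun x _ hx => by
        rw [Finset.mem_Ico] at hx
        rw [if_neg]
        rintro ⟨h1, _⟩
        exact hx ⟨by omega, by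
          rcases Finset.mem_Ico.1 (by assumption : x ∈ Finset.Ico 0 m) with ⟨_, h2⟩
          omega⟩)]
  apply Finset.sum_congr rfl
  intro x hx
  rw [Finset.mem_Ico] at hx
  simp [hx.1]

lemma list_sum_pyRange (m : Nat) (g : Int → Int) :
    ((PySem.List.pyRange 0 (m:Int) 1).map g).sum = ∑ k ∈ Finset.range m, g (k:Int) := by
  rw [PySem.List.pyRange_one]
  simp only [List.map_map, Int.sub_zero, Int.toNat_natCast]
  have h : (g ∘ fun k : Nat => ((0:Int) + (k:Int))) = fun k : Nat => g (k:Int) := by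
    funext k
    simp
  rw [h]
  rfl

lemma A_eq (arr : List Int) (m : Nat) (hlen : m ≤ arr.length) :
    yeag arr (m:Int)
      = ∑ l ∈ Finset.range m, ∑ r ∈ Finset.range m,
          (if l ≤ r ∧ okB arr l (r+1) = true then (1:Int) else 0) := by
  unfold yeag
  have hcong := PySem.List.foldl_congr_mem
    (l := PySem.List.pyRange 0 (m:Int) 1)
    (init := (0:Int))
    (f := fun count l => yeagInnerA arr (PySem.List.pyRange l (m:Int) 1) PySem.Dict.empty count)
    (g := fun count li => count + ∑ r ∈ Finset.Ico li.toNat m,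
        (if okB arr li.toNat (r+1) = true then (1:Int) else 0))
    (by
      intro acc x hx
      rcases (PySem.List.mem_pyRange_one).1 hx with ⟨hx0, hxm⟩
      have hxeq : x = ((x.toNat : Nat) : Int) := by omega
      have hxm' : x.toNat ≤ m := by omega
      simp only []
      rw [hxeq]
      exact A_inner arr m hlen (m - x.toNat) x.toNat x.toNat le_rfl le_rfl hxm'
        PySem.Dict.empty acc (by rw [win_self]; exact Enc_empty)
        (by intro v; rw [win_self]; simp))
  rw [hcong, PySem.List.foldl_add,
      list_sum_pyRange m (fun li => ∑ r ∈ Finset.Ico li.toNat m,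
        (if okB arr li.toNat (r+1) = true then (1:Int) else 0)),
      zero_add]
  apply Finset.sum_congr rfl
  intro l _
  simp only [Int.toNat_natCast]
  exact sum_shift arr m l

-- B's loop body, named for the proofs (definitionally the lambda inside yeag_alt)
def stepB (arr : List Int) (st : PySem.Dict Int Int × Int × Int) (r : Int) :
    PySem.Dict Int Int × Int × Int :=
  let freq0 := st.1.insert (PySem.List.pyGetD arr r 0) (st.1.getD (PySem.List.pyGetD arr r 0) 0 + 1)
  let p := yeagShrink arr (PySem.List.pyGetD arr r 0) (r + 1 - st.2.1).toNat freq0 st.2.1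
  (p.1, p.2, st.2.2 + (r - p.2 + 1))

lemma yeag_alt_eq (arr : List Int) (n : Int) :
    yeag_alt arr n
      = ((PySem.List.pyRange 0 n 1).foldl (stepB arr) (PySem.Dict.empty, 0, 0)).2.2 := rfl

lemma shrink_spec (arr : List Int) (v : Int) (r : Nat) (hr : r < arr.length) :
    ∀ (fuel lN : Nat) (freq : PySem.Dict Int Int),
    lN ≤ r + 1 → r ≤ lN + fuel → Enc freq (win arr lN (r+1)) →
    ∃ (l' : Nat) (freq' : PySem.Dict Int Int),
      yeagShrink arr v fuel freq (lN:Int) = (freq', (l':Int)) ∧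
      lN ≤ l' ∧ l' ≤ r + 1 ∧ Enc freq' (win arr l' (r+1)) ∧
      (win arr l' (r+1)).count v ≤ 2 ∧
      (∀ j, lN ≤ j → j < l' → 2 < (win arr j (r+1)).count v) := by
  intro fuel
  induction fuel with
  | zero =>
    intro lN freq hl hfuel henc
    refine ⟨lN, freq, rfl, le_rfl, hl, henc, ?_, by omega⟩
    have h1 : (win arr lN (r+1)).count v ≤ (win arr lN (r+1)).length :=
      List.count_le_length
    rw [length_win arr lN (by omega)] at h1
    omega
  | succ fuel ih =>
    intro lN freq hl hfuel henc
    have hval := henc v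
    by_cases hc : 2 < (win arr lN (r+1)).count v
    · have hcond : 2 < freq.getD v 0 := by rw [hval]; exact_mod_cast hc
      have hwlen : (win arr lN (r+1)).count v ≤ (win arr lN (r+1)).length :=
        List.count_le_length
      rw [length_win arr lN (by omega)] at hwlen
      have hlr : lN < r := by omega
      have hllen : lN < arr.length := by omega
      have hget : PySem.List.pyGetD arr (lN:Int) 0 = arr[lN] := by
        simp [PySem.List.pyGetD_natCast, List.getD_eq_getElem?_getD, List.getElem?_eq_getElem hllen]
      have hwc : win arr lN (r+1) = arr[lN] :: win arr (lN+1) (r+1) :=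
        win_cons arr (by omega) (by omega)
      have henc' : Enc (freq.insert arr[lN] (freq.getD arr[lN] 0 - 1)) (win arr (lN+1) (r+1)) := by
        intro w
        rw [PySem.Dict.getD_insert]
        by_cases hw : w = arr[lN]
        · rw [if_pos hw, hw]
          have h0 := henc arr[lN]
          rw [hwc, List.count_cons_self] at h0
          rw [h0]
          push_cast
          ring
        · rw [if_neg hw]
          have h0 := henc w
          rw [hwc] at h0
          have hne : ¬ (arr[lN] = w) := fun h => hw h.symm
          simp [hne] at h0
          exact h0
      have hrec := ih (lN+1) (freq.insert arr[lN] (freq.getD arr[lN] 0 - 1))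
        (by omega) (by omega) henc'
      obtain ⟨l', freq', heq, h1, h2, h3, h4, h5⟩ := hrec
      refine ⟨l', freq', ?_, by omega, h2, h3, h4, ?_⟩
      · show yeagShrink arr v (fuel+1) freq (lN:Int) = (freq', (l':Int))
        simp only [yeagShrink]
        rw [if_pos hcond, hget]
        rw [show ((lN:Int) + 1) = ((lN+1 : Nat) : Int) by push_cast; ring]
        exact heq
      · intro j hj1 hj2
        rcases Nat.eq_or_lt_of_le hj1 with hje | hjl
        · subst hje
          exact hc
        · exact h5 j hjl hj2
    · have hcond : ¬ 2 < freq.getD v 0 := by rw [hval]; exact_mod_cast hc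
      refine ⟨lN, freq, ?_, le_rfl, hl, henc, by omega, by omega⟩
      simp only [yeagShrink]
      rw [if_neg hcond]

lemma B_inv (arr : List Int) (m : Nat) (hlen : m ≤ arr.length) :
    ∀ r, r ≤ m → ∃ (freq : PySem.Dict Int Int) (lN : Nat) (count : Int),
      (PySem.List.pyRange 0 (r:Int) 1).foldl (stepB arr) (PySem.Dict.empty, 0, 0)
        = (freq, (lN:Int), count) ∧
      lN ≤ r ∧ Enc freq (win arr lN r) ∧ okP arr lN r ∧
      (∀ j, j < lN → ¬ okP arr j r) ∧
      count = ∑ r' ∈ Finset.range r, ∑ l' ∈ Finset.range m,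
        (if l' ≤ r' ∧ okB arr l' (r'+1) = true then (1:Int) else 0) := by
  intro r
  induction r with
  | zero =>
    intro _
    refine ⟨PySem.Dict.empty, 0, 0, ?_, le_rfl, ?_, ?_, by omega, by simp⟩
    · rw [PySem.List.pyRange_one_eq_nil (by omega)]
      rfl
    · rw [win_self]
      exact Enc_empty
    · intro v
      rw [win_self]
      simp
  | succ r ih =>
    intro hr
    obtain ⟨freq, lN, count, heq, hl, henc, hok, hmin, hcount⟩ := ih (by omega)
    have hrlen : r < arr.length := by omega
    have hget : PySem.List.pyGetD arr (r:Int) 0 = arr[r] := by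
      simp [PySem.List.pyGetD_natCast, List.getD_eq_getElem?_getD, List.getElem?_eq_getElem hrlen]
    have hwsucc : win arr lN (r+1) = win arr lN r ++ [arr[r]] :=
      win_succ arr hl hrlen
    have henc0 : Enc (freq.insert arr[r] (freq.getD arr[r] 0 + 1)) (win arr lN (r+1)) := by
      rw [hwsucc]
      exact Enc_insert_add freq _ _ henc
    have hfuel : ((r:Int) + 1 - (lN:Int)).toNat = r + 1 - lN := by omega
    obtain ⟨l', freq', hshr, h1, h2, h3, h4, h5⟩ :=
      shrink_spec arr arr[r] r hrlen (r + 1 - lN) lN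
        (freq.insert arr[r] (freq.getD arr[r] 0 + 1)) (by omega) (by omega) henc0
    have hmin' : ∀ j, j < l' → ¬ okP arr j (r+1) := by
      intro j hj hokj
      rcases Nat.lt_or_ge j lN with hjl | hjg
      · apply hmin j hjl
        intro w
        have := count_mono_r arr j (show r ≤ r + 1 by omega) w
        have := hokj w
        omega
      · have := h5 j hjg hj
        have := hokj arr[r]
        omega
    have hok' : okP arr l' (r+1) := by
      intro w
      by_cases hw : w = arr[r]
      · subst hw
        exact h4
      · have hm := count_mono_l arr (r+1) h1 w
        have : (win arr lN (r+1)).count w = (win arr lN r).count w := by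
          rw [hwsucc, List.count_append]
          have : List.count w [arr[r]] = 0 := List.count_eq_zero.2 (by simp [hw])
          omega
        have := hok w
        omega
    refine ⟨freq', l', count + ((r:Int) - (l':Int) + 1), ?_, h2, h3, hok', hmin', ?_⟩
    · rw [show ((r+1 : Nat) : Int) = (r:Int) + 1 by push_cast; ring,
          PySem.List.pyRange_one_succ_right (by omega), List.foldl_append, heq]
      show stepB arr (freq, (lN:Int), count) (r:Int) = _
      unfold stepB
      simp only [hget, hfuel, hshr]
    · rw [Finset.sum_range_succ, ← hcount]
      congr 1
      have hiff : ∀ lx ∈ Finset.range m,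
          (if lx ≤ r ∧ okB arr lx (r+1) = true then (1:Int) else 0)
            = (if lx ∈ Finset.Icc l' r then (1:Int) else 0) := by
        intro lx _
        by_cases hcase : l' ≤ lx ∧ lx ≤ r
        · have hokx : okP arr lx (r+1) := by
            intro w
            have hmw := count_mono_l arr (r+1) hcase.1 w
            have := hok' w
            omega
          rw [if_pos ⟨hcase.2, (okB_iff arr lx (r+1)).2 hokx⟩,
              if_pos (Finset.mem_Icc.2 ⟨hcase.1, hcase.2⟩)]
        · have hnot1 : ¬ (lx ≤ r ∧ okB arr lx (r+1) = true) := by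
            rintro ⟨hxr, hokx⟩
            have hxl : lx < l' := by omega
            exact hmin' lx hxl ((okB_iff arr lx (r+1)).1 hokx)
          have hnot2 : lx ∉ Finset.Icc l' r := by
            rw [Finset.mem_Icc]
            omega
          rw [if_neg hnot1, if_neg hnot2]
      rw [Finset.sum_congr rfl hiff, Finset.sum_ite_mem]
      have hsub : Finset.range m ∩ Finset.Icc l' r = Finset.Icc l' r := by
        apply Finset.inter_eq_right.2
        intro x hx
        rw [Finset.mem_Icc] at hx
        rw [Finset.mem_range]
        omega
      rw [hsub, Finset.sum_const, Nat.card_Icc]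
      simp
      omega

lemma B_eq (arr : List Int) (m : Nat) (hlen : m ≤ arr.length) :
    yeag_alt arr (m:Int)
      = ∑ r ∈ Finset.range m, ∑ l ∈ Finset.range m,
          (if l ≤ r ∧ okB arr l (r+1) = true then (1:Int) else 0) := by
  obtain ⟨freq, lN, count, heq, _, _, _, _, hcount⟩ := B_inv arr m hlen m le_rfl
  rw [yeag_alt_eq, heq]
  exact hcount

-- ===== VERDICT (by name: the statement is the Claim_ definition above) =====
theorem yeag_spec : Claim_equal_yeag := by
  intro arr n hdom hpre
  unfold Spec_yeag
  by_cases hn : n ≤ 0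
  · have hA : yeag arr n = 0 := by
      unfold yeag
      rw [PySem.List.pyRange_one_eq_nil (by omega)]
      rfl
    have hB : yeag_alt arr n = 0 := by
      rw [yeag_alt_eq, PySem.List.pyRange_one_eq_nil (by omega)]
      rfl
    rw [hA, hB]
  · rw [not_le] at hn
    have hneq : n = ((n.toNat : Nat) : Int) := by omega
    have hlen : n.toNat ≤ arr.length := by
      unfold Pre_yeag at hpre
      omega
    rw [hneq, A_eq arr n.toNat hlen, B_eq arr n.toNat hlen]
    exact Finset.sum_comm
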